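-- pv_equiv track=rewrite | github.com/donngas/trigger-detent | calibrate.py | update_ini_line
-- ===== SOURCE A (Python) =====
-- def update_ini_line(lines, section, key, value):
--     """
--     Helper to update or add a key=value pair in a specific section within a list of lines.
--     Returns the modified list of lines.
--     """
--     section_found = False
--     key_found = False
--     in_correct_section = False
--     new_lines = []
--
--     # Normalize section header for search
--     target_section_header = f"[{section}]"
--
--     # Iterate to find section and key
--     for i, line in enumerate(lines):
--         stripped = line.strip()
--
--         # Check for section change
--         if stripped.startswith('[') and stripped.endswith(']'):
--             if stripped == target_section_header:
--                 in_correct_section = True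
--                 section_found = True
--             else:
--                 if in_correct_section and not key_found:
--                     # We are leaving the target section and haven't found the key yet.
--                     # Insert the key before the new section starts.
--                     new_lines.append(f"{key} = {value}\n")
--                     key_found = True # Handled
--                 in_correct_section = False
--
--         # Check for key if we are in the correct section
--         if in_correct_section and not key_found:
--             # Ignore comments and invalid lines
--             if '=' in line and not stripped.startswith(';'):
--                 current_key = line.split('=', 1)[0].strip()
--                 if current_key == key:
--                     # Found the key, replace the line
--                     new_lines.append(f"{key} = {value}\n")
--                     key_found = True
--                     continue
--
--         new_lines.append(line)
--
--     # If we reached the end of the file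
--     if not section_found:
--         # Append section and key at the end
--         if new_lines and not new_lines[-1].endswith('\n'):
--             new_lines.append('\n')
--         new_lines.append(f"\n{target_section_header}\n")
--         new_lines.append(f"{key} = {value}\n")
--     elif section_found and not key_found:
--         # Section existed but key was not found by the time we finished the file
--         # Append key at the very end (safe assumption as we are technically still "after" that section)
--         # However, to be cleaner, we might want to check if the last line is blank
--         if new_lines and not new_lines[-1].endswith('\n'):
--             new_lines.append('\n')
--         new_lines.append(f"{key} = {value}\n")
--
--     return new_lines
-- ===== SOURCE B (Python) =====
-- def update_ini_line(lines, section, key, value):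
--     """Two-phase index-based rewrite: locate the target section and the key line
--     by index, then rebuild the list by slicing."""
--     target = f"[{section}]"
--     newline = f"{key} = {value}\n"
--
--     def is_target(l):
--         return l.strip() == target
--
--     def is_other_header(l):
--         s = l.strip()
--         return s.startswith('[') and s.endswith(']') and s != target
--
--     def matches_key(l):
--         return '=' in l and not l.strip().startswith(';') and l.split('=', 1)[0].strip() == key
--
--     i0 = next((i for i, l in enumerate(lines) if is_target(l)), None)
--     if i0 is None:
--         out = list(lines)
--         if out and not out[-1].endswith('\n'):
--             out.append('\n')
--         out.append(f"\n{target}\n")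
--         out.append(newline)
--         return out
--     head, tail = lines[:i0], lines[i0:]
--     e = next((j for j, l in enumerate(tail) if is_other_header(l)), len(tail))
--     sec, after = tail[:e], tail[e:]
--     k = next((j for j, l in enumerate(sec) if matches_key(l)), None)
--     if k is not None:
--         return head + sec[:k] + [newline] + sec[k + 1:] + after
--     if after:
--         return head + sec + [newline] + after
--     out = list(lines)
--     if out and not out[-1].endswith('\n'):
--         out.append('\n')
--     out.append(newline)
--     return out
-- ===== Notes on version B (the rewrite author's own statement) =====
-- stated objective: alternative
-- what changed: A's single pass with section/key state flags and a growing output list is replaced by a two-phase index computation: first find the target-section start, the section end (next foreign header) and the matching key line by index, then rebuild the result by list slicing.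
import Mathlib
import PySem

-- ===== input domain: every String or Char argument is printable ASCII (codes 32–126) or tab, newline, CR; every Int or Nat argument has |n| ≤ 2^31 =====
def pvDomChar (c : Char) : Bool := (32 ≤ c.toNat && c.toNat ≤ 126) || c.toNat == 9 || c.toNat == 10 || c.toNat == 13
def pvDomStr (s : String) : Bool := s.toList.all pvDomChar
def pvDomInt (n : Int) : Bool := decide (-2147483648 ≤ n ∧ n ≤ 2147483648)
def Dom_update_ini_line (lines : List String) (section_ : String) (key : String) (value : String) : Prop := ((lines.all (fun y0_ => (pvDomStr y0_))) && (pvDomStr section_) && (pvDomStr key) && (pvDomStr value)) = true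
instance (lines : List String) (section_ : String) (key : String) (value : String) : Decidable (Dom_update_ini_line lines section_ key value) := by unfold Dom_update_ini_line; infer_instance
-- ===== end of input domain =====

-- B replaces A's one-pass flag-machine by a two-phase index computation (find the section start,
-- the section end and the key line by index, then rebuild by slicing); objective: alternative decomposition.

-- ===== PORT A =====
-- the loop of A, carrying (section_found, key_found, in_correct_section, new_lines);
-- returns (new_lines, section_found, key_found)
def uilLoopA (target key value : String) :
    List String → Bool → Bool → Bool → List String → List String × Bool × Bool
  | [], sf, kf, _ics, acc => (acc, sf, kf)
  | line :: rest, sf, kf, ics, acc =>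
    let stripped := PySem.Str.strip line
    let st :=
      if PySem.Str.startswith stripped "[" && PySem.Str.endswith stripped "]" then
        if stripped == target then (true, kf, true, acc)
        else if ics && !kf then
          (sf, true, false, acc ++ [key ++ " = " ++ value ++ "\n"])
        else (sf, kf, false, acc)
      else (sf, kf, ics, acc)
    match st with
    | (sf', kf', ics', acc') =>
      if ics' && !kf' && PySem.Str.isIn "=" line && !(PySem.Str.startswith stripped ";") &&
          (PySem.Str.strip (((PySem.Str.splitMax? line "=" 1).getD []).headD "") == key) then
        -- '=' in line guards the split, so split('=',1)[0] exists (headD never defaults)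
        uilLoopA target key value rest sf' true ics' (acc' ++ [key ++ " = " ++ value ++ "\n"])
      else
        uilLoopA target key value rest sf' kf' ics' (acc' ++ [line])

def update_ini_line (lines : List String) (section_ : String) (key : String) (value : String) : List String :=
  let target := "[" ++ section_ ++ "]"
  match uilLoopA target key value lines false false false [] with
  | (new_lines, section_found, key_found) =>
    if !section_found then
      let nl := new_lines ++
        (match new_lines.getLast? with
         | some l => if !PySem.Str.endswith l "\n" then ["\n"] else []
         | none => [])
      nl ++ ["\n" ++ target ++ "\n"] ++ [key ++ " = " ++ value ++ "\n"]
    else if section_found && !key_found then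
      let nl := new_lines ++
        (match new_lines.getLast? with
         | some l => if !PySem.Str.endswith l "\n" then ["\n"] else []
         | none => [])
      nl ++ [key ++ " = " ++ value ++ "\n"]
    else new_lines

-- ===== PORT B =====
-- B's named predicates (is_target / is_other_header / matches_key in Source B)
def pvIsTarget (target l : String) : Bool := PySem.Str.strip l == target

def pvIsOther (target l : String) : Bool :=
  let s := PySem.Str.strip l
  PySem.Str.startswith s "[" && PySem.Str.endswith s "]" && s != target

def pvMatchesKey (key l : String) : Bool :=
  PySem.Str.isIn "=" l && !(PySem.Str.startswith (PySem.Str.strip l) ";") &&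
    (PySem.Str.strip (((PySem.Str.splitMax? l "=" 1).getD []).headD "") == key)

-- trailing-newline fixup shared by the two EOF branches of Source B
def pvFixup (out : List String) : List String :=
  out ++ (match out.getLast? with
          | some l => if !PySem.Str.endswith l "\n" then ["\n"] else []
          | none => [])

def update_ini_line_alt (lines : List String) (section_ : String) (key : String) (value : String) : List String :=
  let target := "[" ++ section_ ++ "]"
  let newline := key ++ " = " ++ value ++ "\n"
  match lines.findIdx? (pvIsTarget target) with
  | none => pvFixup lines ++ ["\n" ++ target ++ "\n", newline]
  | some i0 =>
    let head := lines.take i0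
    let tail := lines.drop i0
    let e := (tail.findIdx? (pvIsOther target)).getD tail.length
    let sec := tail.take e
    let after := tail.drop e
    match sec.findIdx? (pvMatchesKey key) with
    | some k => head ++ sec.take k ++ [newline] ++ sec.drop (k + 1) ++ after
    | none =>
      if after ≠ [] then head ++ sec ++ [newline] ++ after
      else pvFixup lines ++ [newline]

-- ===== PRECONDITION & SPEC =====
def Spec_update_ini_line (lines : List String) (section_ : String) (key : String) (value : String) (out : List String) : Prop := out = update_ini_line_alt lines section_ key value
instance (lines : List String) (section_ : String) (key : String) (value : String) (out : List String) : Decidable (Spec_update_ini_line lines section_ key value out) := by unfold Spec_update_ini_line; infer_instance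

-- ===== CLAIM (what is proved, stated in full; the proofs are below) =====
def Claim_equal_update_ini_line : Prop := ∀ (lines : List String) (section_ : String) (key : String) (value : String), Dom_update_ini_line lines section_ key value → Spec_update_ini_line lines section_ key value (update_ini_line lines section_ key value)

-- ===== LEMMAS AND PROOFS =====

-- the in-section behaviour, as a recursive spec: `some r` = the key line was placed
-- (replaced or inserted before the closing header) inside the rewritten suffix `r`,
-- `none` = the section runs to EOF without the key
def pvSecSpec (target key value : String) : List String → Option (List String)
  | [] => none
  | h :: t =>
    if pvIsOther target h then some ((key ++ " = " ++ value ++ "\n") :: h :: t)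
    else if pvMatchesKey key h then some ((key ++ " = " ++ value ++ "\n") :: t)
    else (pvSecSpec target key value t).map (h :: ·)

-- a string that strips to the target header passes A's bracket test
theorem pv_target_hdr (section_ l : String)
    (h : (PySem.Str.strip l == ("[" ++ section_ ++ "]")) = true) :
    (PySem.Str.startswith (PySem.Str.strip l) "[" &&
     PySem.Str.endswith (PySem.Str.strip l) "]") = true := by
  rw [eq_of_beq h]
  simp [PySem.Chars.startswith_iff, PySem.Chars.endswith_iff]
  simpa using List.suffix_append ('[' :: section_.toList) [']']

-- a line stripping to the target header is not an "other" header
theorem pv_target_not_other (target l : String)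
    (h : (PySem.Str.strip l == target) = true) : pvIsOther target l = false := by
  simp only [pvIsOther, eq_of_beq h]
  simp

-- once key_found is true (and section_found), the loop copies the rest unchanged
theorem uilLoopA_done (target key value : String) (ls : List String) :
    ∀ (ics : Bool) (acc : List String),
      uilLoopA target key value ls true true ics acc = (acc ++ ls, true, true) := by
  induction ls with
  | nil => intro ics acc; simp [uilLoopA]
  | cons line rest ih =>
    intro ics acc
    simp only [uilLoopA]
    cases ics <;> (split_ifs <;> simp_all)

-- before the section is found, lines not stripping to the target header are copied unchanged
theorem uilLoopA_prefix (target key value : String) (xs : List String) :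
    ∀ (ys acc : List String), (∀ x ∈ xs, pvIsTarget target x = false) →
      uilLoopA target key value (xs ++ ys) false false false acc =
      uilLoopA target key value ys false false false (acc ++ xs) := by
  induction xs with
  | nil => intro ys acc _; simp
  | cons x xs ih =>
    intro ys acc hx
    have hx0 : (PySem.Str.strip x == target) = false := by
      simpa [pvIsTarget] using hx x (by simp)
    have hxs : ∀ y ∈ xs, pvIsTarget target y = false := fun y hy => hx y (by simp [hy])
    simp only [List.cons_append, uilLoopA]
    split_ifs <;> simp_all [ih ys (acc ++ [x]) hxs]

-- inside the target section A's loop realises pvSecSpec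
theorem uilLoopA_section (target key value : String) (rest : List String) :
    ∀ acc : List String,
      uilLoopA target key value rest true false true acc =
      (match pvSecSpec target key value rest with
       | some r => (acc ++ r, true, true)
       | none => (acc ++ rest, true, false)) := by
  induction rest with
  | nil => intro acc; simp [uilLoopA, pvSecSpec]
  | cons h t ih =>
    intro acc
    simp only [uilLoopA, pvSecSpec]
    split_ifs <;>
      simp_all [pvIsOther, pvMatchesKey, uilLoopA_done] <;>
      cases hS : pvSecSpec target key value t <;> simp_all

-- B's slice-and-search computation on the section suffix also realises pvSecSpec
theorem pvSecB_eq (target key value : String) (xs : List String) :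
    (match (xs.take ((xs.findIdx? (pvIsOther target)).getD xs.length)).findIdx? (pvMatchesKey key) with
     | some k =>
       some ((xs.take ((xs.findIdx? (pvIsOther target)).getD xs.length)).take k ++
             [key ++ " = " ++ value ++ "\n"] ++
             (xs.take ((xs.findIdx? (pvIsOther target)).getD xs.length)).drop (k + 1) ++
             xs.drop ((xs.findIdx? (pvIsOther target)).getD xs.length))
     | none =>
       if xs.drop ((xs.findIdx? (pvIsOther target)).getD xs.length) ≠ [] then
         some (xs.take ((xs.findIdx? (pvIsOther target)).getD xs.length) ++
               [key ++ " = " ++ value ++ "\n"] ++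
               xs.drop ((xs.findIdx? (pvIsOther target)).getD xs.length))
       else none) = pvSecSpec target key value xs := by
  induction xs with
  | nil => simp [pvSecSpec]
  | cons h t ih =>
    by_cases hP : pvIsOther target h = true
    · simp [pvSecSpec, hP, List.findIdx?_cons]
    · have hPf : pvIsOther target h = false := by simpa using hP
      have he : (List.findIdx? (pvIsOther target) (h :: t)).getD (h :: t).length
          = ((List.findIdx? (pvIsOther target) t).getD t.length) + 1 := by
        rw [List.findIdx?_cons]
        cases hE : List.findIdx? (pvIsOther target) t <;> simp [hPf]
      by_cases hQ : pvMatchesKey key h = true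
      · simp [pvSecSpec, hPf, hQ, List.take_succ_cons, List.findIdx?_cons, List.drop_succ_cons]
      · have hQf : pvMatchesKey key h = false := by simpa using hQ
        rw [he] at *
        simp only [List.take_succ_cons, List.drop_succ_cons, List.findIdx?_cons, hQf, if_false,
          pvSecSpec, hPf, Bool.false_eq_true, ← ih]
        cases hK : List.findIdx? (pvMatchesKey key)
            (t.take ((List.findIdx? (pvIsOther target) t).getD t.length)) <;>
          simp [List.take_succ_cons]

-- B's port on an input whose target section starts at index i0
theorem alt_found (lines : List String) (section_ key value : String) (i0 : Nat)
    (hI : lines.findIdx? (pvIsTarget ("[" ++ section_ ++ "]")) = some i0) :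
    update_ini_line_alt lines section_ key value =
      (match pvSecSpec ("[" ++ section_ ++ "]") key value (lines.drop i0) with
       | some r => lines.take i0 ++ r
       | none => pvFixup lines ++ [key ++ " = " ++ value ++ "\n"]) := by
  simp only [update_ini_line_alt, hI]
  rw [← pvSecB_eq ("[" ++ section_ ++ "]") key value (lines.drop i0)]
  cases hK : List.findIdx? (pvMatchesKey key)
      ((lines.drop i0).take (((lines.drop i0).findIdx? (pvIsOther ("[" ++ section_ ++ "]"))).getD (lines.drop i0).length)) with
  | some k => simp
  | none =>
    by_cases hA : (lines.drop i0).drop (((lines.drop i0).findIdx? (pvIsOther ("[" ++ section_ ++ "]"))).getD (lines.drop i0).length) = []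
    · simp only [ne_eq, hA, not_true_eq_false, if_false]
    · simp only [ne_eq, hA, not_false_eq_true, if_true]
      simp

-- processing the opening target-header line itself (A also key-matches this very line)
theorem uilLoopA_target_step (section_ key value l0 : String) (t acc : List String)
    (hpred' : (PySem.Str.strip l0 == ("[" ++ section_ ++ "]")) = true) :
    uilLoopA ("[" ++ section_ ++ "]") key value (l0 :: t) false false false acc =
      (if pvMatchesKey key l0 then
        uilLoopA ("[" ++ section_ ++ "]") key value t true true true (acc ++ [key ++ " = " ++ value ++ "\n"])
       else uilLoopA ("[" ++ section_ ++ "]") key value t true false true (acc ++ [l0])) := by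
  have hhdr := pv_target_hdr section_ l0 hpred'
  simp only [uilLoopA, hhdr, hpred', if_true]
  by_cases hQ : pvMatchesKey key l0 = true
  · have hQ' := hQ; simp [pvMatchesKey] at hQ'
    simp only [hQ, if_true]
    simp
    intro f; exact absurd hQ'.2 (f hQ'.1.1 hQ'.1.2)
  · have hQf : pvMatchesKey key l0 = false := by simpa using hQ
    simp only [hQf, Bool.false_eq_true, if_false]
    simp
    intro a b c; exact absurd (by simp [pvMatchesKey, a, b, c] : pvMatchesKey key l0 = true) hQ

-- ===== VERDICT (by name: the statement is the Claim_ definition above) =====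
theorem update_ini_line_spec : Claim_equal_update_ini_line := by
  unfold Claim_equal_update_ini_line Spec_update_ini_line
  intro lines section_ key value _
  cases hI : lines.findIdx? (pvIsTarget ("[" ++ section_ ++ "]")) with
  | none =>
    have hx : ∀ x ∈ lines, pvIsTarget ("[" ++ section_ ++ "]") x = false := by
      simpa [List.findIdx?_eq_none_iff] using hI
    have hA := uilLoopA_prefix ("[" ++ section_ ++ "]") key value lines [] [] hx
    simp only [List.append_nil, List.nil_append] at hA
    simp only [update_ini_line, hA, uilLoopA, update_ini_line_alt, hI, pvFixup]
    simp
  | some i0 =>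
    rw [alt_found lines section_ key value i0 hI]
    obtain ⟨hlt, hpred, hbefore⟩ := List.findIdx?_eq_some_iff_getElem.mp hI
    have hxTake : ∀ x ∈ lines.take i0, pvIsTarget ("[" ++ section_ ++ "]") x = false := by
      intro x hxm
      obtain ⟨j, hj, hjx⟩ := List.mem_take_iff_getElem.mp hxm
      have := hbefore j (by omega)
      simp only [hjx] at this
      simpa using this
    have hdropc : lines.drop i0 = lines[i0] :: lines.drop (i0 + 1) :=
      List.drop_eq_getElem_cons hlt
    have hA0 : uilLoopA ("[" ++ section_ ++ "]") key value lines false false false [] =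
        uilLoopA ("[" ++ section_ ++ "]") key value (lines.drop i0) false false false (lines.take i0) := by
      conv_lhs => rw [← List.take_append_drop i0 lines]
      simpa using uilLoopA_prefix ("[" ++ section_ ++ "]") key value (lines.take i0) (lines.drop i0) [] hxTake
    have hpred' : (PySem.Str.strip lines[i0] == ("[" ++ section_ ++ "]")) = true := by
      simpa [pvIsTarget] using hpred
    have hPf : pvIsOther ("[" ++ section_ ++ "]") lines[i0] = false :=
      pv_target_not_other _ _ hpred'
    simp only [update_ini_line, hA0]
    rw [hdropc, uilLoopA_target_step section_ key value _ _ _ hpred']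
    by_cases hQ : pvMatchesKey key lines[i0] = true
    · simp only [hQ, if_true, uilLoopA_done]
      simp [pvSecSpec, hPf, hQ]
    · have hQf : pvMatchesKey key lines[i0] = false := by simpa using hQ
      simp only [hQf, Bool.false_eq_true, if_false,
        uilLoopA_section ("[" ++ section_ ++ "]") key value (lines.drop (i0 + 1))]
      cases hS : pvSecSpec ("[" ++ section_ ++ "]") key value (lines.drop (i0 + 1)) with
      | some r =>
        have htk : List.take (i0 + 1) lines = List.take i0 lines ++ [lines[i0]] := by
          rw [List.take_add_one, List.getElem?_eq_getElem hlt]; rfl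
        simp [pvSecSpec, hPf, hQf, hS]
        rw [List.append_cons, ← htk]
      | none =>
        simp [pvSecSpec, hPf, hQf, hS, pvFixup]
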